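-- pv_equiv track=rewrite | github.com/SeunghyoKu/Algorithms | Programmers/Level1/k번째수.py | solution
-- ===== SOURCE A (Python) =====
-- def solution(array, commands):
--     answer = []
--     for i in range(len(commands)):
--         start, end = [commands[i][0]-1][0], [commands[i][1]][0]
--         arr = sorted(array[start:end])
--         index = commands[i][2] -1
--         answer.append(arr[index])
--     return answer
-- ===== SOURCE B (Python) =====
-- def solution(array, commands):
--     # Incrementally maintains a sorted accumulator (insertion sort) per command
--     # instead of calling the library sort on the whole slice.
--     answer = []
--     for c in commands:
--         start, k = c[0] - 1, c[2]
--         srt = []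
--         for x in array[start:c[1]]:
--             i = 0
--             while i < len(srt) and srt[i] <= x:
--                 i += 1
--             srt.insert(i, x)
--         answer.append(srt[k - 1])
--     return answer
-- ===== Notes on version B (the rewrite author's own statement) =====
-- stated objective: alternative
-- what changed: B iterates over the command rows directly and builds each subarray's ordering incrementally with a hand-maintained sorted accumulator (insertion sort) instead of indexing via range(len(commands)) and calling the built-in sort on the slice.
import Mathlib
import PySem

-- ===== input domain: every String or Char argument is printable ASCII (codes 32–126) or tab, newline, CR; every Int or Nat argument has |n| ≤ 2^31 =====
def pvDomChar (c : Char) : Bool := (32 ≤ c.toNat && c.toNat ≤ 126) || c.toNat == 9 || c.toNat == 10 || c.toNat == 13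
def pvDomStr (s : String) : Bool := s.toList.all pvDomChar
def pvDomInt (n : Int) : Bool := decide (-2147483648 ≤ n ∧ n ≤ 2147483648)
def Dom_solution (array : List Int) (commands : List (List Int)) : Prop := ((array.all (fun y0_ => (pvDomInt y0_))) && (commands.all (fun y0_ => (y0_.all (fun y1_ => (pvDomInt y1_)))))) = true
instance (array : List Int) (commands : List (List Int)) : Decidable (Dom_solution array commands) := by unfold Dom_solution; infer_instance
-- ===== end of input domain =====

-- B iterates over the command rows directly and maintains an incrementally sorted
-- accumulator (insertion sort) per subarray instead of indexing by range(len(commands))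
-- and calling the built-in sort on the slice; objective: alternative.

-- ===== PORT A =====
def solution (array : List Int) (commands : List (List Int)) : List Int :=
  (PySem.List.pyRange 0 commands.length 1).foldl (fun answer i =>
    let c := PySem.List.pyGetD commands i []
    let start := PySem.List.pyGetD c 0 0 - 1
    let end_ := PySem.List.pyGetD c 1 0
    let arr := PySem.List.sorted (PySem.List.slice array (some start) (some end_)) (fun x => x) false
    let index := PySem.List.pyGetD c 2 0 - 1
    answer ++ [PySem.List.pyGetD arr index 0]) []

-- ===== PORT B =====
-- Source B's inner while loop: insert x after every element ≤ x (before the first strictly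
-- greater one), scanning from the left — exact transcription of the scan-and-insert.
def insSorted (x : Int) : List Int → List Int
  | [] => [x]
  | y :: ys => if y ≤ x then y :: insSorted x ys else x :: y :: ys

def solution_alt (array : List Int) (commands : List (List Int)) : List Int :=
  commands.foldl (fun answer c =>
    let start := PySem.List.pyGetD c 0 0 - 1
    let k := PySem.List.pyGetD c 2 0
    let srt := (PySem.List.slice array (some start) (some (PySem.List.pyGetD c 1 0))).foldl
      (fun acc x => insSorted x acc) []
    answer ++ [PySem.List.pyGetD srt (k - 1) 0]) []

-- ===== PRECONDITION & SPEC =====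
-- Pre_ excludes exactly the inputs on which A raises: a command row with fewer than
-- three entries (IndexError on commands[i][2]) or a k-index outside Python's index
-- range of the sliced subarray (IndexError on arr[index]).
def Pre_solution (array : List Int) (commands : List (List Int)) : Prop :=
  ∀ c ∈ commands, 3 ≤ c.length ∧
    PySem.Raise.InRange
      (PySem.List.clampIdx array.length (PySem.List.pyGetD c 1 0) -
        PySem.List.clampIdx array.length (PySem.List.pyGetD c 0 0 - 1))
      (PySem.List.pyGetD c 2 0 - 1)
instance (array : List Int) (commands : List (List Int)) : Decidable (Pre_solution array commands) := by unfold Pre_solution; infer_instance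

def pvWitness_solution : List Int × List (List Int) :=
  ([1, 5, 2, 6, 3, 7, 4], [[2, 5, 3], [4, 4, 1], [1, 7, 3]])

def Spec_solution (array : List Int) (commands : List (List Int)) (out : List Int) : Prop := out = solution_alt array commands
instance (array : List Int) (commands : List (List Int)) (out : List Int) : Decidable (Spec_solution array commands out) := by unfold Spec_solution; infer_instance

-- ===== CLAIM (what is proved, stated in full; the proofs are below) =====
def Claim_equal_solution : Prop := ∀ (array : List Int) (commands : List (List Int)), Dom_solution array commands → Pre_solution array commands → Spec_solution array commands (solution array commands)

-- ===== LEMMAS AND PROOFS =====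

-- B's scan-and-insert is PySem's insertBy on (· < ·)
theorem insSorted_eq_insertBy (x : Int) (l : List Int) :
    insSorted x l = PySem.List.insertBy (fun a b => decide (a < b)) x l := by
  induction l with
  | nil => rfl
  | cons y ys ih =>
      simp only [insSorted, PySem.List.insertBy, ih]
      by_cases h : y ≤ x
      · simp [h, not_lt.mpr h]
      · simp [h, lt_of_not_ge h]

-- B's inner fold computes exactly Python's sorted (no key, no reverse)
theorem foldl_insSorted_eq_sorted (l : List Int) :
    l.foldl (fun acc x => insSorted x acc) [] = PySem.List.sorted l (fun x => x) false := by
  rw [PySem.List.sorted_eq_foldl_insertBy]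
  simp [insSorted_eq_insertBy]

-- A's loop body and B's loop body as named step functions (proof helpers only)
def stepA (array : List Int) (answer : List Int) (c : List Int) : List Int :=
  answer ++ [PySem.List.pyGetD
    (PySem.List.sorted
      (PySem.List.slice array (some (PySem.List.pyGetD c 0 0 - 1)) (some (PySem.List.pyGetD c 1 0)))
      (fun x => x) false)
    (PySem.List.pyGetD c 2 0 - 1) 0]

def stepB (array : List Int) (answer : List Int) (c : List Int) : List Int :=
  answer ++ [PySem.List.pyGetD
    ((PySem.List.slice array (some (PySem.List.pyGetD c 0 0 - 1)) (some (PySem.List.pyGetD c 1 0))).foldl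
      (fun acc x => insSorted x acc) [])
    (PySem.List.pyGetD c 2 0 - 1) 0]

theorem step_eq (array : List Int) : stepA array = stepB array := by
  funext answer c
  unfold stepA stepB
  rw [foldl_insSorted_eq_sorted]

-- ===== VERDICT (by name: the statement is the Claim_ definition above) =====
theorem solution_spec : Claim_equal_solution := by
  intro array commands _ _
  unfold Spec_solution solution solution_alt
  refine Eq.trans (PySem.List.foldl_pyRange_zero_pyGetD' commands ([] : List Int) (stepA array) ([] : List Int)) ?_
  rw [step_eq]
  rfl
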